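-- pv_equiv track=rewrite | github.com/xogns3725/codeTest | 배열의 길이에 따라 다른 연산하기.py | solution
-- ===== SOURCE A (Python) =====
-- def solution(arr, n):
--     answer = []
--     # if len(arr)%2==1:
--     #     for i in range(len(arr)):
--     #         if i%2==0:
--     #             answer.append(arr[i]+n)
--     #         else:
--     #             answer.append(arr[i])
--     # else:
--     #     for i in range(len(arr)):
--     #         if i%2==1:
--     #             answer.append(arr[i]+n)
--     #         else:
--     #             answer.append(arr[i])
--     # return answer
--
--     for i in range(len(arr)):
--         if (len(arr) % 2 == 1 and i % 2 == 0) or len(arr) % 2 == 0 and i % 2 == 1: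
--             answer.append(arr[i] + n)
--         else:
--             answer.append(arr[i])
--     return answer
-- ===== SOURCE B (Python) =====
-- def solution(arr, n):
--     answer = list(arr)
--     for i in range(1 - len(arr) % 2, len(arr), 2):
--         answer[i] += n
--     return answer
-- ===== Notes on version B (the rewrite author's own statement) =====
-- stated objective: simpler
-- what changed: Instead of looping over every index and testing a compound parity condition per element, B copies the list once and adds n only at the modified positions via a strided range starting at the closed-form offset 1 - len(arr) % 2 (constant-factor speedup: half the loop iterations, no per-element branch).
import Mathlib
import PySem

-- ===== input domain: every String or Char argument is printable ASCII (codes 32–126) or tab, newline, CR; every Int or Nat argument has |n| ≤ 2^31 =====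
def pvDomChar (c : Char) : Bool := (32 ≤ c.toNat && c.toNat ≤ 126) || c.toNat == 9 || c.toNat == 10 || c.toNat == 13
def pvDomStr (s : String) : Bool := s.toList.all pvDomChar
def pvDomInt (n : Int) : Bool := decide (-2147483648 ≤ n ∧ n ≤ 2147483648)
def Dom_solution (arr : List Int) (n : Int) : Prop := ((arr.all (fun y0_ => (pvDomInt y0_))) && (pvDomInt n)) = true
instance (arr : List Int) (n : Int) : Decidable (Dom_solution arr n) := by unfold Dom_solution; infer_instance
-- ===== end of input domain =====

-- B replaces A's per-element parity branch by a copy of the list plus a strided loop over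
-- only the modified positions, starting at the closed-form offset 1 - len(arr) % 2 (simpler).

-- ===== PORT A =====
def solution (arr : List Int) (n : Int) : List Int :=
  (PySem.List.pyRange 0 (arr.length : Int) 1).foldl
    (fun answer i =>
      if (PySem.Int.mod (arr.length : Int) 2 == 1 && PySem.Int.mod i 2 == 0)
          || (PySem.Int.mod (arr.length : Int) 2 == 0 && PySem.Int.mod i 2 == 1)
      then answer ++ [PySem.List.pyGetD arr i 0 + n]
      else answer ++ [PySem.List.pyGetD arr i 0]) []

-- ===== PORT B =====
def solution_alt (arr : List Int) (n : Int) : List Int :=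
  (PySem.List.pyRange (1 - PySem.Int.mod (arr.length : Int) 2) (arr.length : Int) 2).foldl
    (fun answer i => answer.modify i.toNat (· + n)) arr

-- ===== PRECONDITION & SPEC =====
def Spec_solution (arr : List Int) (n : Int) (out : List Int) : Prop := out = solution_alt arr n
instance (arr : List Int) (n : Int) (out : List Int) : Decidable (Spec_solution arr n out) := by unfold Spec_solution; infer_instance

-- ===== CLAIM (what is proved, stated in full; the proofs are below) =====
def Claim_equal_solution : Prop := ∀ (arr : List Int) (n : Int), Dom_solution arr n → Spec_solution arr n (solution arr n)

-- ===== LEMMAS AND PROOFS =====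

-- B's loop: folding modify over distinct nonnegative indices adds n exactly at those indices.
theorem foldl_modify_getElem? (n : Int) :
    ∀ (idxs : List Int) (arr : List Int), idxs.Nodup → (∀ i ∈ idxs, 0 ≤ i) → ∀ (k : Nat),
      (idxs.foldl (fun l i => l.modify i.toNat (· + n)) arr)[k]?
        = arr[k]?.map (fun x => if (k : Int) ∈ idxs then x + n else x) := by
  intro idxs
  induction idxs with
  | nil => intro arr _ _ k; simp
  | cons i rest ih =>
    intro arr hnd hpos k
    have hi : 0 ≤ i := hpos i (by simp)
    have hnd' := hnd
    rw [List.nodup_cons] at hnd'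
    simp only [List.foldl_cons]
    rw [ih _ hnd'.2 (fun j hj => hpos j (by simp [hj])) k, List.getElem?_modify]
    by_cases hk : (k : Int) = i
    · have : i.toNat = k := by omega
      cases h : arr[k]? <;> simp [this, hk, hnd'.1]
    · have : i.toNat ≠ k := by omega
      cases h : arr[k]? <;> simp [this, hk]

-- A's loop is a map over the index range.
theorem solution_eq_map (arr : List Int) (n : Int) :
    solution arr n = (PySem.List.pyRange 0 (arr.length : Int) 1).map
      (fun i =>
        if (PySem.Int.mod (arr.length : Int) 2 == 1 && PySem.Int.mod i 2 == 0)
            || (PySem.Int.mod (arr.length : Int) 2 == 0 && PySem.Int.mod i 2 == 1)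
        then PySem.List.pyGetD arr i 0 + n
        else PySem.List.pyGetD arr i 0) := by
  unfold solution
  have hfun : (fun (answer : List Int) (i : Int) =>
      if (PySem.Int.mod (arr.length : Int) 2 == 1 && PySem.Int.mod i 2 == 0)
          || (PySem.Int.mod (arr.length : Int) 2 == 0 && PySem.Int.mod i 2 == 1)
      then answer ++ [PySem.List.pyGetD arr i 0 + n]
      else answer ++ [PySem.List.pyGetD arr i 0])
    = (fun (answer : List Int) (i : Int) => answer ++
        [if (PySem.Int.mod (arr.length : Int) 2 == 1 && PySem.Int.mod i 2 == 0)
            || (PySem.Int.mod (arr.length : Int) 2 == 0 && PySem.Int.mod i 2 == 1)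
         then PySem.List.pyGetD arr i 0 + n
         else PySem.List.pyGetD arr i 0]) := by
    funext a i; split <;> rfl
  rw [hfun, PySem.List.foldl_append_singleton_eq_map, List.nil_append]

theorem nodup_range2 (a b : Int) : (PySem.List.pyRange a b 2).Nodup := by
  rw [PySem.List.pyRange_of_pos a b (by norm_num)]
  refine List.Nodup.map ?_ (List.nodup_range)
  intro p q h; simp only [] at h; omega

-- ===== VERDICT (by name: the statement is the Claim_ definition above) =====
theorem solution_spec : Claim_equal_solution := by
  intro arr n _
  unfold Spec_solution solution_alt
  rw [solution_eq_map]
  have h2 : (0 : Int) < 2 := by norm_num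
  have hmod : PySem.Int.mod (arr.length : Int) 2 = (arr.length : Int) % 2 :=
    PySem.Int.mod_eq_emod_of_pos h2
  set s : Int := 1 - PySem.Int.mod (arr.length : Int) 2 with hs
  have hpos : ∀ i ∈ PySem.List.pyRange s (arr.length : Int) 2, 0 ≤ i := by
    intro i hi
    rw [PySem.List.mem_pyRange_iff_of_pos h2] at hi
    omega
  apply List.ext_getElem?
  intro k
  rw [List.getElem?_map, PySem.List.getElem?_pyRange_one,
      foldl_modify_getElem? n _ arr (nodup_range2 _ _) hpos k]
  simp only [zero_add]
  by_cases hk : k < arr.length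
  · have harr : arr[k]? = some arr[k] := List.getElem?_eq_getElem hk
    have hmem : (k : Int) ∈ PySem.List.pyRange s (arr.length : Int) 2 ↔
        ((PySem.Int.mod (arr.length : Int) 2 == 1 && PySem.Int.mod ((k:Int)) 2 == 0)
          || (PySem.Int.mod (arr.length : Int) 2 == 0 && PySem.Int.mod ((k:Int)) 2 == 1)) = true := by
      rw [PySem.List.mem_pyRange_iff_of_pos h2]
      have hkmod : PySem.Int.mod ((k:Int)) 2 = (k : Int) % 2 := PySem.Int.mod_eq_emod_of_pos h2
      simp only [hmod, hkmod, hs, Bool.or_eq_true, Bool.and_eq_true, beq_iff_eq]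
      omega
    have hget : PySem.List.pyGetD arr ((k:Int)) 0 = arr[k] := by
      rw [PySem.List.pyGetD_eq_getElem arr 0 (by omega) (by exact_mod_cast hk)]
      simp
    rw [harr]
    simp only [if_pos (by omega : k < ((arr.length : Int) - 0).toNat), Option.map_some]
    by_cases hmem' : (k : Int) ∈ PySem.List.pyRange s (arr.length : Int) 2
    · rw [if_pos (hmem.mp hmem'), if_pos hmem', hget]
    · rw [if_neg (fun hb => hmem' (hmem.mpr hb)), if_neg hmem', hget]
  · have harr : arr[k]? = none := by simp; omega
    rw [harr, if_neg (by omega : ¬ k < ((arr.length : Int) - 0).toNat)]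
    simp
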